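-- pv_equiv track=rewrite | github.com/JohanEddeland/AdventOfCode | 2018/02/aoc_02.py | solve_task1
-- ===== SOURCE A (Python) =====
-- def solve_task1(aoc_input: list) -> int:
--     """ solve_task1
--
--         In task 1, check the input and calculate the number of times that we have lines with double and triple
--         occurrences of letters, respectively. Return the product of these two numbers.
--
--     :param aoc_input: A list of strings; the input provided
--     :return: total_count: The product of the two numbers (double and triple counts)
--     """
--     # Initialize counters to keep track of occurrences of double and triple letters
--     total_double = 0
--     total_triple = 0
--
--     for line in aoc_input:
--         # letter_dict is a counting dictionary - the keys are letters, and the values are the number of occurrences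
--         # of that letter
--         letter_dict = dict()
--
--         for letter in line:
--             letter_dict[letter] = letter_dict.get(letter, 0) + 1
--
--         if 2 in letter_dict.values():
--             total_double += 1
--
--         if 3 in letter_dict.values():
--             total_triple += 1
--
--     total_count = total_double * total_triple
--     return total_count
-- ===== SOURCE B (Python) =====
-- def solve_task1(aoc_input: list) -> int:
--     """Sort each line's characters and scan consecutive equal runs; a run of
--     length exactly 2 (resp. 3) flags the line as a double (resp. triple)."""
--     total_double = 0
--     total_triple = 0
--     for line in aoc_input:
--         s = sorted(line)
--         has2 = False
--         has3 = False
--         i = 0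
--         while i < len(s):
--             j = i
--             while j < len(s) and s[j] == s[i]:
--                 j += 1
--             if j - i == 2:
--                 has2 = True
--             if j - i == 3:
--                 has3 = True
--             i = j
--         total_double += has2
--         total_triple += has3
--     return total_double * total_triple
-- ===== Notes on version B (the rewrite author's own statement) =====
-- stated objective: alternative
-- what changed: Replaces the per-line letter-counting dictionary with sorting each line's characters and scanning consecutive equal-character runs, flagging runs of length exactly 2 or 3.
import Mathlib
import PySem

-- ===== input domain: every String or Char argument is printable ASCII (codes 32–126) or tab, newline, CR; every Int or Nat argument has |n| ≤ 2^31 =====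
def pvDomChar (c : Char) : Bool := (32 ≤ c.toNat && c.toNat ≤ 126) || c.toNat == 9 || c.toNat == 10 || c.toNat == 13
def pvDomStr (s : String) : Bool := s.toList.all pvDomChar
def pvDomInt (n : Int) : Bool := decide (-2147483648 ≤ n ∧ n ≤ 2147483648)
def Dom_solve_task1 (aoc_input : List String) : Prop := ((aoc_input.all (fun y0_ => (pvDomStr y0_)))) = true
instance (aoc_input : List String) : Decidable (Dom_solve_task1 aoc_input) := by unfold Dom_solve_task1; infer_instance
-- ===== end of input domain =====

-- B replaces the per-line letter-counting dictionary by a sort-then-scan of equal-character runs (alternative decomposition, similar cost).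

-- ===== PORT A =====
def solve_task1 (aoc_input : List String) : Int :=
  let p := aoc_input.foldl (fun (acc : Int × Int) line =>
    let letter_dict := line.toList.foldl
      (fun (d : PySem.Dict Char Int) letter => d.insert letter (d.getD letter 0 + 1))
      PySem.Dict.empty
    let acc1 := if letter_dict.values.contains 2 then acc.1 + 1 else acc.1
    let acc2 := if letter_dict.values.contains 3 then acc.2 + 1 else acc.2
    (acc1, acc2)) (0, 0)
  p.1 * p.2

-- ===== PORT B =====
-- inner while loop of Source B: advance over the run equal to the head, recurse on the rest
def runFlags : List Char → Bool × Bool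
  | [] => (false, false)
  | x :: t =>
    let n : Nat := 1 + (t.takeWhile (fun c => c == x)).length
    let rest := runFlags (t.dropWhile (fun c => c == x))
    (rest.1 || n == 2, rest.2 || n == 3)
termination_by s => s.length
decreasing_by
  have := List.length_dropWhile_le (fun c => c == x) t
  simp only [List.length_cons]; omega

def solve_task1_alt (aoc_input : List String) : Int :=
  let p := aoc_input.foldl (fun (acc : Int × Int) line =>
    let f := runFlags (PySem.List.sorted line.toList (fun c => c) false)
    (acc.1 + (if f.1 then 1 else 0), acc.2 + (if f.2 then 1 else 0))) (0, 0)
  p.1 * p.2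

-- ===== PRECONDITION & SPEC =====
def Spec_solve_task1 (aoc_input : List String) (out : Int) : Prop := out = solve_task1_alt aoc_input
instance (aoc_input : List String) (out : Int) : Decidable (Spec_solve_task1 aoc_input out) := by unfold Spec_solve_task1; infer_instance

-- ===== CLAIM (what is proved, stated in full; the proofs are below) =====
def Claim_equal_solve_task1 : Prop := ∀ (aoc_input : List String), Dom_solve_task1 aoc_input → Spec_solve_task1 aoc_input (solve_task1 aoc_input)

-- ===== LEMMAS AND PROOFS =====

lemma counter_values_contains (cs : List Char) (n : Int) :
    (PySem.Dict.counter cs).values.contains n = true ↔ ∃ c ∈ cs, (cs.count c : Int) = n := by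
  have hv : (PySem.Dict.counter cs).values = (PySem.Set.ofList cs).map (fun k => (cs.count k : Int)) := by
    simp [PySem.Dict.values, PySem.Dict.items_counter, List.map_map]
  rw [hv, List.contains_iff_mem, List.mem_map]
  constructor
  · rintro ⟨c, hc, h⟩; exact ⟨c, (PySem.Set.mem_ofList cs c).mp hc, h⟩
  · rintro ⟨c, hc, h⟩; exact ⟨c, (PySem.Set.mem_ofList cs c).mpr hc, h⟩

lemma lt_of_mem_dropWhile (x : Char) (t : List Char) (hp : t.Pairwise (· ≤ ·))
    (hle : ∀ c ∈ t, x ≤ c) : ∀ c ∈ t.dropWhile (fun c => c == x), x < c := by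
  induction t with
  | nil => simp
  | cons h r ih =>
    intro c hc
    by_cases hh : (h == x) = true
    · rw [List.dropWhile_cons, if_pos hh] at hc
      exact ih (List.pairwise_cons.mp hp).2 (fun d hd => hle d (List.mem_cons_of_mem _ hd)) c hc
    · rw [List.dropWhile_cons, if_neg hh] at hc
      have hxh : x < h :=
        lt_of_le_of_ne (hle h List.mem_cons_self)
          (fun he => hh (by rw [← he]; exact beq_self_eq_true x))
      rcases List.mem_cons.mp hc with rfl | hc
      · exact hxh
      · exact lt_of_lt_of_le hxh ((List.pairwise_cons.mp hp).1 c hc)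

lemma exists_count_cons (x : Char) (t : List Char) (ht : (x :: t).Pairwise (· ≤ ·)) (n : Nat) :
    (∃ c ∈ x :: t, (x :: t).count c = n) ↔
      (1 + (t.takeWhile (fun c => c == x)).length = n ∨
       ∃ c ∈ t.dropWhile (fun c => c == x), (t.dropWhile (fun c => c == x)).count c = n) := by
  set u := t.takeWhile (fun c => c == x) with hu
  set v := t.dropWhile (fun c => c == x) with hv
  have htuv : t = u ++ v := (List.takeWhile_append_dropWhile).symm
  have hux : ∀ c ∈ u, c = x := by
    intro c hc
    have := List.mem_takeWhile_imp hc
    simpa using this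
  have hle : ∀ c ∈ t, x ≤ c := (List.pairwise_cons.mp ht).1
  have hvgt : ∀ c ∈ v, x < c :=
    lt_of_mem_dropWhile x t (List.pairwise_cons.mp ht).2 hle
  have hcountx : (x :: t).count x = 1 + u.length := by
    have hcu : u.count x = u.length := by
      apply List.count_eq_length.mpr
      intro c hc; have := hux c hc; simp [this]
    have hcv : v.count x = 0 := by
      apply List.count_eq_zero.mpr
      intro hx; exact lt_irrefl x (hvgt x hx)
    rw [htuv]
    simp [List.count_append, hcu, hcv]
    omega
  have hcv_eq : ∀ c ∈ v, (x :: t).count c = v.count c := by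
    intro c hc
    have hcx : c ≠ x := fun h => lt_irrefl x (h ▸ hvgt c hc)
    have hcu : u.count c = 0 := by
      apply List.count_eq_zero.mpr
      intro hcu; exact hcx (hux c hcu)
    rw [htuv]
    simp [List.count_append, hcu, Ne.symm hcx]
  constructor
  · rintro ⟨c, hc, hcount⟩
    by_cases hcx : c = x
    · subst hcx; left; rw [← hcount, hcountx]
    · have hct : c ∈ t := by
        rcases List.mem_cons.mp hc with h | h
        · exact absurd h hcx
        · exact h
      have hcv : c ∈ v := by
        rw [htuv] at hct
        rcases List.mem_append.mp hct with h | h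
        · exact absurd (hux c h) hcx
        · exact h
      right; exact ⟨c, hcv, by rw [← hcv_eq c hcv]; exact hcount⟩
  · rintro (h | ⟨c, hc, hcount⟩)
    · exact ⟨x, by simp, by rw [hcountx]; exact h⟩
    · refine ⟨c, ?_, by rw [hcv_eq c hc]; exact hcount⟩
      rw [htuv]
      exact List.mem_cons_of_mem _ (List.mem_append.mpr (Or.inr hc))

lemma runFlags_spec (s : List Char) :
    s.Pairwise (· ≤ ·) →
    (((runFlags s).1 = true ↔ ∃ c ∈ s, s.count c = 2) ∧
     ((runFlags s).2 = true ↔ ∃ c ∈ s, s.count c = 3)) := by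
  induction s using runFlags.induct with
  | case1 => simp [runFlags]
  | case2 x t ih =>
    intro hs
    have hpv : (t.dropWhile (fun c => c == x)).Pairwise (· ≤ ·) :=
      List.Pairwise.sublist (List.dropWhile_sublist _) (List.pairwise_cons.mp hs).2
    have ih' := ih hpv
    rw [runFlags]
    simp only [Bool.or_eq_true, beq_iff_eq]
    constructor
    · rw [exists_count_cons x t hs 2, ih'.1]; exact or_comm
    · rw [exists_count_cons x t hs 3, ih'.2]; exact or_comm

lemma exists_count_sorted (cs : List Char) (m : Nat) :
    (∃ c ∈ PySem.List.sorted cs (fun c => c) false,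
        (PySem.List.sorted cs (fun c => c) false).count c = m)
      ↔ ∃ c ∈ cs, cs.count c = m := by
  have hperm := PySem.List.sorted_perm (xs := cs) (key := fun c => c) (rev := false)
  constructor <;> rintro ⟨c, hc, h⟩
  · exact ⟨c, hperm.mem_iff.mp hc, by rw [← hperm.count_eq]; exact h⟩
  · exact ⟨c, hperm.mem_iff.mpr hc, by rw [hperm.count_eq]; exact h⟩

lemma sorted_pairwise_le (cs : List Char) :
    (PySem.List.sorted cs (fun c => c) false).Pairwise (· ≤ ·) := by
  simpa using PySem.List.sorted_pairwise (xs := cs) (key := fun c => c)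

lemma flag_eq (cs : List Char) (m : Nat) :
    (PySem.Dict.counter cs).values.contains (m : Int)
      = decide (∃ c ∈ cs, cs.count c = m) := by
  rw [Bool.eq_iff_iff, counter_values_contains, decide_eq_true_iff]
  constructor <;> rintro ⟨c, hc, h⟩ <;> exact ⟨c, hc, by exact_mod_cast h⟩

lemma flag2 (cs : List Char) :
    (PySem.Dict.counter cs).values.contains 2
      = (runFlags (PySem.List.sorted cs (fun c => c) false)).1 := by
  have h := (runFlags_spec _ (sorted_pairwise_le cs)).1
  rw [exists_count_sorted cs 2] at h
  rw [Bool.eq_iff_iff, h]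
  have := flag_eq cs 2
  rw [Bool.eq_iff_iff, decide_eq_true_iff] at this
  exact_mod_cast this

lemma flag3 (cs : List Char) :
    (PySem.Dict.counter cs).values.contains 3
      = (runFlags (PySem.List.sorted cs (fun c => c) false)).2 := by
  have h := (runFlags_spec _ (sorted_pairwise_le cs)).2
  rw [exists_count_sorted cs 3] at h
  rw [Bool.eq_iff_iff, h]
  have := flag_eq cs 3
  rw [Bool.eq_iff_iff, decide_eq_true_iff] at this
  exact_mod_cast this

-- ===== VERDICT (by name: the statement is the Claim_ definition above) =====
theorem solve_task1_spec : Claim_equal_solve_task1 := by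
  intro aoc _
  show solve_task1 aoc = solve_task1_alt aoc
  unfold solve_task1 solve_task1_alt
  have hf : (fun (acc : Int × Int) (line : String) =>
      let letter_dict := line.toList.foldl
        (fun (d : PySem.Dict Char Int) letter => d.insert letter (d.getD letter 0 + 1))
        PySem.Dict.empty
      let acc1 := if letter_dict.values.contains 2 then acc.1 + 1 else acc.1
      let acc2 := if letter_dict.values.contains 3 then acc.2 + 1 else acc.2
      (acc1, acc2))
    = (fun (acc : Int × Int) (line : String) =>
      let f := runFlags (PySem.List.sorted line.toList (fun c => c) false)
      (acc.1 + (if f.1 then 1 else 0), acc.2 + (if f.2 then 1 else 0))) := by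
    funext acc line
    simp only [PySem.Dict.foldl_insert_getD_add_one_eq_counter, flag2, flag3]
    cases (runFlags (PySem.List.sorted line.toList (fun c => c) false)).1 <;>
      cases (runFlags (PySem.List.sorted line.toList (fun c => c) false)).2 <;> simp
  rw [hf]
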